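-- pv_equiv track=rewrite | github.com/pakkio/lsl_simulator | lsl_simulator.py | api_llListSort
-- ===== SOURCE A (Python) =====
-- def api_llListSort(lst, stride, ascending):
--     if not isinstance(lst, list) or stride <= 0:
--         return lst
--
--     # Group elements by stride
--     groups = []
--     for i in range(0, len(lst), stride):
--         groups.append(lst[i:i+stride])
--
--     # Sort groups by first element
--     groups.sort(key=lambda x: x[0], reverse=not ascending)
--
--     # Flatten back to list
--     result = []
--     for group in groups:
--         result.extend(group)
--     return result
-- ===== SOURCE B (Python) =====
-- def api_llListSort(lst, stride, ascending):
--     if not isinstance(lst, list) or stride <= 0: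
--         return lst
--     # Stable selection sort over group-head indices: repeatedly take the first
--     # remaining group with the extremal first element and emit its slice.
--     idxs = list(range(0, len(lst), stride))
--     out = []
--     while idxs:
--         if ascending:
--             best = min(idxs, key=lambda i: lst[i])
--         else:
--             best = max(idxs, key=lambda i: lst[i])
--         idxs.remove(best)
--         out.extend(lst[best:best+stride])
--     return out
-- ===== Notes on version B (the rewrite author's own statement) =====
-- stated objective: alternative
-- what changed: B replaces the library sort of materialised sublists by a hand-written stable selection sort: it repeatedly picks the first remaining group-head index with extremal first element (min/max with key), removes it, and emits that group's slice, so no comparison sort and no container of groups exists.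
import Mathlib
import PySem

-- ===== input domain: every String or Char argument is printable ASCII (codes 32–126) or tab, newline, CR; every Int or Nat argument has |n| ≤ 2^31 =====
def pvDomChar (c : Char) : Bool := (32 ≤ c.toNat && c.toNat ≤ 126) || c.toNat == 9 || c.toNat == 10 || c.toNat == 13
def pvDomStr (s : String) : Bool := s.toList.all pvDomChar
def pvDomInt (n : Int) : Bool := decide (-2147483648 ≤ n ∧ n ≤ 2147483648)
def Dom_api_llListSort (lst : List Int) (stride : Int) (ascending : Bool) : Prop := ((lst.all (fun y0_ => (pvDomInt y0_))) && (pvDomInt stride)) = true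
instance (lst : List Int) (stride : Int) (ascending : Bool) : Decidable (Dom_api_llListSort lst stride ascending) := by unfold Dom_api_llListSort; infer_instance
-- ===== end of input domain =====

-- B replaces the library sort of materialised sublists by a hand-written stable selection
-- sort over group-head indices (objective: alternative algorithm, no comparison sort).

-- ===== PORT A =====
def api_llListSort (lst : List Int) (stride : Int) (ascending : Bool) : List Int :=
  if stride ≤ 0 then lst
  else
    -- groups = []; for i in range(0, len(lst), stride): groups.append(lst[i:i+stride])
    let groups : List (List Int) :=
      (PySem.List.pyRange 0 (lst.length : Int) stride).foldl
        (fun gs i => gs ++ [PySem.List.slice lst (some i) (some (i + stride))]) []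
    -- groups.sort(key=lambda x: x[0], reverse=not ascending)
    -- x[0] is always in range (groups are non-empty), so pyGetD is exact here
    let groups := PySem.List.sorted groups (fun g => PySem.List.pyGetD g 0 0) (!ascending)
    -- result = []; for group in groups: result.extend(group)
    groups.foldl (fun result group => result ++ group) []

-- ===== PORT B =====
-- best = min(idxs, key=lambda i: lst[i]) / max(...); lst[i] is always in range, so pyGetD is exact
def pvSelect_api_llListSort (lst : List Int) (ascending : Bool) (idxs : List Int) : Option Int :=
  if ascending then PySem.List.min? idxs (fun i => PySem.List.pyGetD lst i 0)
  else PySem.List.max? idxs (fun i => PySem.List.pyGetD lst i 0)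

-- while idxs: best = …; idxs.remove(best); out.extend(lst[best:best+stride])
-- (min/max of a non-empty list always succeeds, so the `none` branch is the empty-list exit)
def pvSelLoop_api_llListSort (lst : List Int) (stride : Int) (ascending : Bool)
    (idxs : List Int) (out : List Int) : List Int :=
  match h : pvSelect_api_llListSort lst ascending idxs with
  | none => out
  | some best =>
      pvSelLoop_api_llListSort lst stride ascending (idxs.erase best)
        (out ++ PySem.List.slice lst (some best) (some (best + stride)))
termination_by idxs.length
decreasing_by
  have hm : best ∈ idxs := by
    unfold pvSelect_api_llListSort at h
    split at h
    · exact PySem.List.min?_mem h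
    · exact PySem.List.max?_mem h
  have := List.length_pos_of_mem hm
  rw [List.length_erase_of_mem hm]
  omega

def api_llListSort_alt (lst : List Int) (stride : Int) (ascending : Bool) : List Int :=
  if stride ≤ 0 then lst
  else
    -- idxs = list(range(0, len(lst), stride)); out = []; while idxs: …
    pvSelLoop_api_llListSort lst stride ascending
      (PySem.List.pyRange 0 (lst.length : Int) stride) []

-- ===== PRECONDITION & SPEC =====
def Spec_api_llListSort (lst : List Int) (stride : Int) (ascending : Bool) (out : List Int) : Prop := out = api_llListSort_alt lst stride ascending
instance (lst : List Int) (stride : Int) (ascending : Bool) (out : List Int) : Decidable (Spec_api_llListSort lst stride ascending out) := by unfold Spec_api_llListSort; infer_instance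

-- ===== CLAIM (what is proved, stated in full; the proofs are below) =====
def Claim_equal_api_llListSort : Prop := ∀ (lst : List Int) (stride : Int) (ascending : Bool), Dom_api_llListSort lst stride ascending → Spec_api_llListSort lst stride ascending (api_llListSort lst stride ascending)

-- ===== LEMMAS AND PROOFS =====

-- the stable order both programs realise: strictly smaller key first (reversed when
-- descending), ties broken by the original (index) order
def pvR (key : Int → Int) (asc : Bool) (a b : Int) : Prop :=
  (if asc then key a < key b else key b < key a) ∨ (key a = key b ∧ a < b)

theorem pvR_trans (key : Int → Int) (asc : Bool) {a b c : Int}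
    (h1 : pvR key asc a b) (h2 : pvR key asc b c) : pvR key asc a c := by
  unfold pvR at *; cases asc <;> simp at * <;> omega

theorem pvR_asymm (key : Int → Int) (asc : Bool) {a b : Int}
    (h1 : pvR key asc a b) (h2 : pvR key asc b a) : False := by
  unfold pvR at *; cases asc <;> simp at * <;> omega

theorem pv_insertBy_pairwise (R : Int → Int → Prop) (before : Int → Int → Bool)
    (htrans : ∀ {a b c}, R a b → R b c → R a c) (x : Int) (acc : List Int)
    (hacc : acc.Pairwise R)
    (ht : ∀ y ∈ acc, before x y = true → R x y)
    (hf : ∀ y ∈ acc, before x y = false → R y x) :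
    (PySem.List.insertBy before x acc).Pairwise R := by
  induction acc with
  | nil => simp [PySem.List.insertBy]
  | cons y t ih =>
    rcases List.pairwise_cons.mp hacc with ⟨hyt, hts⟩
    simp only [PySem.List.insertBy]
    by_cases hb : before x y = true
    · rw [if_pos hb]
      refine List.pairwise_cons.mpr ⟨?_, hacc⟩
      intro z hz
      rcases List.mem_cons.mp hz with rfl | hz
      · exact ht z (by simp) hb
      · exact htrans (ht y (by simp) hb) (hyt z hz)
    · rw [if_neg hb]
      refine List.pairwise_cons.mpr ⟨?_, ?_⟩
      · intro z hz
        rcases (PySem.List.mem_insertBy before x z t).mp hz with rfl | hz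
        · exact hf y (by simp) (by simpa using hb)
        · exact hyt z hz
      · exact ih hts (fun z hz hbz => ht z (by simp [hz]) hbz)
          (fun z hz hbz => hf z (by simp [hz]) hbz)

theorem pv_foldl_insertBy_pairwise (R : Int → Int → Prop) (before : Int → Int → Bool)
    (htrans : ∀ {a b c}, R a b → R b c → R a c)
    (hcompat : ∀ y x : Int, y < x →
      (before x y = true → R x y) ∧ (before x y = false → R y x)) :
    ∀ (idxs acc : List Int), idxs.Pairwise (· < ·) → acc.Pairwise R →
      (∀ a ∈ acc, ∀ z ∈ idxs, a < z) →
      (idxs.foldl (fun acc x => PySem.List.insertBy before x acc) acc).Pairwise R := by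
  intro idxs
  induction idxs with
  | nil => intro acc _ hacc _; simpa using hacc
  | cons x t ih =>
    intro acc hidx hacc hlt
    rcases List.pairwise_cons.mp hidx with ⟨hxt, hts⟩
    simp only [List.foldl_cons]
    refine ih _ hts ?_ ?_
    · exact pv_insertBy_pairwise R before htrans x acc hacc
        (fun y hy => (hcompat y x (hlt y hy x (by simp))).1)
        (fun y hy => (hcompat y x (hlt y hy x (by simp))).2)
    · intro a ha z hz
      rcases (PySem.List.mem_insertBy before x a acc).mp ha with rfl | ha
      · exact hxt z hz
      · exact hlt a ha z (by simp [hz])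

theorem pv_sorted_pairwiseR (key : Int → Int) (asc : Bool) (idxs : List Int)
    (h : idxs.Pairwise (· < ·)) :
    (PySem.List.sorted idxs key (!asc)).Pairwise (pvR key asc) := by
  cases asc
  · simp only [Bool.not_false]
    rw [PySem.List.sorted_rev_eq_foldl_insertBy]
    refine pv_foldl_insertBy_pairwise (pvR key false) (fun a b => decide (key b < key a))
      (fun h1 h2 => pvR_trans key false h1 h2) ?_ idxs [] h (by simp) (by simp)
    intro y x hyx
    constructor <;> intro hb <;> unfold pvR <;> simp at hb ⊢ <;> omega
  · simp only [Bool.not_true]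
    rw [PySem.List.sorted_eq_foldl_insertBy]
    refine pv_foldl_insertBy_pairwise (pvR key true) (fun a b => decide (key a < key b))
      (fun h1 h2 => pvR_trans key true h1 h2) ?_ idxs [] h (by simp) (by simp)
    intro y x hyx
    constructor <;> intro hb <;> unfold pvR <;> simp at hb ⊢ <;> omega

-- min? / max? of a cons: the running candidate keeps the earlier element on ties
theorem pv_min?_cons (key : Int → Int) : ∀ (t : List Int) (x : Int),
    PySem.List.min? (x :: t) key = some (match PySem.List.min? t key with
      | none => x
      | some m => if key m < key x then m else x) := by
  intro t
  induction t with
  | nil => intro x; rfl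
  | cons y t' ih =>
    intro x
    have hstep : PySem.List.min? (x :: y :: t') key
        = PySem.List.min? ((if key y < key x then y else x) :: t') key := by
      simp only [PySem.List.min?, List.foldl_cons]
      congr 1
      split_ifs <;> rfl
    rw [hstep, ih (if key y < key x then y else x), ih y]
    rcases hm : PySem.List.min? t' key with _ | m' <;>
      simp only [Option.some.injEq] <;> split_ifs <;> first | rfl | omega

theorem pv_max?_cons (key : Int → Int) : ∀ (t : List Int) (x : Int),
    PySem.List.max? (x :: t) key = some (match PySem.List.max? t key with
      | none => x
      | some m => if key x < key m then m else x) := by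
  intro t
  induction t with
  | nil => intro x; rfl
  | cons y t' ih =>
    intro x
    have hstep : PySem.List.max? (x :: y :: t') key
        = PySem.List.max? ((if key x < key y then y else x) :: t') key := by
      simp only [PySem.List.max?, List.foldl_cons]
      congr 1
      split_ifs <;> rfl
    rw [hstep, ih (if key x < key y then y else x), ih y]
    rcases hm : PySem.List.max? t' key with _ | m' <;>
      simp only [Option.some.injEq] <;> split_ifs <;> first | rfl | omega

-- the first minimal element relates (strictly, by pvR) to everything that remains
theorem pv_min_first (key : Int → Int) : ∀ (idxs : List Int), idxs.Pairwise (· < ·) →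
    ∀ m, PySem.List.min? idxs key = some m →
    ∀ y ∈ idxs.erase m, pvR key true m y := by
  intro idxs
  induction idxs with
  | nil => intro _ m hm; simp [PySem.List.min?] at hm
  | cons x t ih =>
    intro h m hm y hy
    rcases List.pairwise_cons.mp h with ⟨hxt, hts⟩
    rw [pv_min?_cons] at hm
    rcases hmt : PySem.List.min? t key with _ | mv
    · have ht : t = [] := (PySem.List.min?_eq_none_iff t key).mp hmt
      subst ht
      have hm' : x = m := by simpa using hm
      subst hm'
      simp at hy
    · rw [hmt] at hm
      have hm' : (if key mv < key x then mv else x) = m := by simpa using hm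
      by_cases hlt : key mv < key x
      · rw [if_pos hlt] at hm'
        subst hm'
        have hmem : mv ∈ t := PySem.List.min?_mem hmt
        have hne : (x == mv) = false := by
          simp only [beq_eq_false_iff_ne, ne_eq]
          intro hc; have := hxt mv hmem; omega
        simp only [List.erase_cons, hne, Bool.false_eq_true, if_false] at hy
        rcases List.mem_cons.mp hy with rfl | hy
        · exact Or.inl (by simpa using hlt)
        · exact ih hts mv hmt y hy
      · rw [if_neg hlt] at hm'
        subst hm'
        rw [List.erase_cons_head] at hy
        have h1 : key x ≤ key mv := by omega
        have h2 : key mv ≤ key y := PySem.List.min?_isMin hmt y hy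
        unfold pvR
        by_cases he : key x = key y
        · exact Or.inr ⟨he, hxt y hy⟩
        · exact Or.inl (by simp; omega)

theorem pv_max_first (key : Int → Int) : ∀ (idxs : List Int), idxs.Pairwise (· < ·) →
    ∀ m, PySem.List.max? idxs key = some m →
    ∀ y ∈ idxs.erase m, pvR key false m y := by
  intro idxs
  induction idxs with
  | nil => intro _ m hm; simp [PySem.List.max?] at hm
  | cons x t ih =>
    intro h m hm y hy
    rcases List.pairwise_cons.mp h with ⟨hxt, hts⟩
    rw [pv_max?_cons] at hm
    rcases hmt : PySem.List.max? t key with _ | mv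
    · have ht : t = [] := (PySem.List.max?_eq_none_iff t key).mp hmt
      subst ht
      have hm' : x = m := by simpa using hm
      subst hm'
      simp at hy
    · rw [hmt] at hm
      have hm' : (if key x < key mv then mv else x) = m := by simpa using hm
      by_cases hlt : key x < key mv
      · rw [if_pos hlt] at hm'
        subst hm'
        have hmem : mv ∈ t := PySem.List.max?_mem hmt
        have hne : (x == mv) = false := by
          simp only [beq_eq_false_iff_ne, ne_eq]
          intro hc; have := hxt mv hmem; omega
        simp only [List.erase_cons, hne, Bool.false_eq_true, if_false] at hy
        rcases List.mem_cons.mp hy with rfl | hy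
        · exact Or.inl (by simpa using hlt)
        · exact ih hts mv hmt y hy
      · rw [if_neg hlt] at hm'
        subst hm'
        rw [List.erase_cons_head] at hy
        have h1 : key mv ≤ key x := by omega
        have h2 : key y ≤ key mv := PySem.List.max?_isMax hmt y hy
        unfold pvR
        by_cases he : key x = key y
        · exact Or.inr ⟨he, hxt y hy⟩
        · exact Or.inl (by simp; omega)

theorem pv_select_mem (lst : List Int) (asc : Bool) (idxs : List Int) (m : Int)
    (h : pvSelect_api_llListSort lst asc idxs = some m) : m ∈ idxs := by
  unfold pvSelect_api_llListSort at h
  split at h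
  · exact PySem.List.min?_mem h
  · exact PySem.List.max?_mem h

-- head of the stable sort = the first extremal element; the tail sorts the rest
theorem pv_sorted_select (lst : List Int) (asc : Bool) (idxs : List Int) (m : Int)
    (h : idxs.Pairwise (· < ·))
    (hsel : pvSelect_api_llListSort lst asc idxs = some m) :
    PySem.List.sorted idxs (fun i => PySem.List.pyGetD lst i 0) (!asc)
      = m :: PySem.List.sorted (idxs.erase m) (fun i => PySem.List.pyGetD lst i 0) (!asc) := by
  have hmem : m ∈ idxs := pv_select_mem lst asc idxs m hsel
  have hfirst : ∀ y ∈ idxs.erase m, pvR (fun i => PySem.List.pyGetD lst i 0) asc m y := by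
    unfold pvSelect_api_llListSort at hsel
    cases asc
    · exact pv_max_first _ idxs h m (by simpa using hsel)
    · exact pv_min_first _ idxs h m (by simpa using hsel)
  have herased : (idxs.erase m).Pairwise (· < ·) := h.sublist (List.erase_sublist)
  refine List.Perm.eq_of_pairwise (le := pvR (fun i => PySem.List.pyGetD lst i 0) asc) ?_ ?_ ?_ ?_
  · exact fun a b _ _ h1 h2 => absurd h2 (fun h2 => pvR_asymm _ asc h1 h2)
  · exact pv_sorted_pairwiseR _ asc idxs h
  · refine List.pairwise_cons.mpr ⟨?_, pv_sorted_pairwiseR _ asc _ herased⟩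
    intro y hy
    exact hfirst y ((PySem.List.mem_sorted _ _ _ y).mp hy)
  · exact ((PySem.List.sorted_perm _ _ _).trans (List.perm_cons_erase hmem)).trans
      (List.Perm.cons m (PySem.List.sorted_perm _ _ _).symm)

-- the selection loop computes the slices of the stably sorted index list
theorem pv_selLoop_eq (lst : List Int) (stride : Int) (asc : Bool) :
    ∀ (n : Nat) (idxs : List Int), idxs.length = n → idxs.Pairwise (· < ·) → ∀ (out : List Int),
    pvSelLoop_api_llListSort lst stride asc idxs out
      = out ++ (PySem.List.sorted idxs (fun i => PySem.List.pyGetD lst i 0) (!asc)).flatMap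
          (fun i => PySem.List.slice lst (some i) (some (i + stride))) := by
  intro n
  induction n using Nat.strong_induction_on with
  | _ n ih =>
    intro idxs hlen hpw out
    rw [pvSelLoop_api_llListSort]
    split
    · rename_i hsel
      have hnil : idxs = [] := by
        unfold pvSelect_api_llListSort at hsel
        split at hsel
        · exact (PySem.List.min?_eq_none_iff _ _).mp hsel
        · exact (PySem.List.max?_eq_none_iff _ _).mp hsel
      subst hnil
      simp [PySem.List.sorted]
    · rename_i m hsel
      have hmem : m ∈ idxs := pv_select_mem lst asc idxs m hsel
      have hlt : (idxs.erase m).length < n := by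
        rw [List.length_erase_of_mem hmem]
        have := List.length_pos_of_mem hmem
        omega
      rw [ih _ hlt (idxs.erase m) rfl (hpw.sublist (List.erase_sublist))]
      rw [pv_sorted_select lst asc idxs m hpw hsel, List.flatMap_cons, List.append_assoc]

-- the group heads 0, stride, 2*stride, … are strictly increasing
theorem pv_heads_pairwise (n stride : Int) (hs : 0 < stride) :
    (PySem.List.pyRange 0 n stride).Pairwise (· < ·) := by
  rw [PySem.List.pyRange_of_pos 0 n hs]
  refine List.Pairwise.map _ ?_ (List.pairwise_lt_range)
  intro a b hab
  have : (a : Int) < (b : Int) := by exact_mod_cast hab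
  nlinarith

-- ===== A-side lemmas: the sorted list of slices is the slices of the sorted heads =====
theorem insertBy_map {α β : Type} (f : α → β) (before : β → β → Bool) (x : α) (ys : List α) :
    PySem.List.insertBy before (f x) (ys.map f)
      = (PySem.List.insertBy (fun a b => before (f a) (f b)) x ys).map f := by
  induction ys with
  | nil => simp [PySem.List.insertBy]
  | cons y t ih =>
    simp only [List.map_cons, PySem.List.insertBy]
    split_ifs <;> simp [ih]

theorem foldl_insertBy_map {α β : Type} (f : α → β) (before : β → β → Bool)
    (xs : List α) (acc : List α) :
    List.foldl (fun acc x => PySem.List.insertBy before x acc) (acc.map f) (xs.map f)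
      = (List.foldl (fun acc x => PySem.List.insertBy (fun a b => before (f a) (f b)) x acc) acc xs).map f := by
  induction xs generalizing acc with
  | nil => rfl
  | cons x t ih =>
    simp only [List.map_cons, List.foldl_cons]
    rw [insertBy_map, ih]

theorem sorted_map {α β κ : Type} [LT κ] [DecidableLT κ] (f : α → β) (k : β → κ)
    (xs : List α) (rev : Bool) :
    PySem.List.sorted (xs.map f) k rev = (PySem.List.sorted xs (fun x => k (f x)) rev).map f := by
  cases rev
  · rw [PySem.List.sorted_eq_foldl_insertBy, PySem.List.sorted_eq_foldl_insertBy]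
    exact foldl_insertBy_map f (fun a b => decide (k a < k b)) xs []
  · rw [PySem.List.sorted_rev_eq_foldl_insertBy, PySem.List.sorted_rev_eq_foldl_insertBy]
    exact foldl_insertBy_map f (fun a b => decide (k b < k a)) xs []

theorem insertBy_congr {α : Type} (b1 b2 : α → α → Bool) (x : α) (ys : List α)
    (h : ∀ y ∈ ys, b1 x y = b2 x y) :
    PySem.List.insertBy b1 x ys = PySem.List.insertBy b2 x ys := by
  induction ys with
  | nil => rfl
  | cons y t ih =>
    simp only [PySem.List.insertBy]
    rw [h y (by simp)]
    split_ifs <;> simp [ih (fun z hz => h z (by simp [hz]))]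

theorem foldl_insertBy_congr {α : Type} (b1 b2 : α → α → Bool) (xs acc : List α)
    (h : ∀ x y, x ∈ xs → (y ∈ xs ∨ y ∈ acc) → b1 x y = b2 x y) :
    List.foldl (fun acc x => PySem.List.insertBy b1 x acc) acc xs
      = List.foldl (fun acc x => PySem.List.insertBy b2 x acc) acc xs := by
  induction xs generalizing acc with
  | nil => rfl
  | cons x t ih =>
    simp only [List.foldl_cons]
    rw [insertBy_congr b1 b2 x acc (fun y hy => h x y (by simp) (Or.inr hy))]
    exact ih _ (fun a c ha hc => h a c (by simp [ha]) (by
      rcases hc with hc | hc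
      · exact Or.inl (by simp [hc])
      · rcases (PySem.List.mem_insertBy b2 x c acc).mp hc with rfl | hc
        · exact Or.inl (by simp)
        · exact Or.inr hc))

theorem sorted_key_congr {α κ : Type} [LT κ] [DecidableLT κ] (k1 k2 : α → κ)
    (xs : List α) (rev : Bool) (h : ∀ x ∈ xs, k1 x = k2 x) :
    PySem.List.sorted xs k1 rev = PySem.List.sorted xs k2 rev := by
  cases rev
  · rw [PySem.List.sorted_eq_foldl_insertBy, PySem.List.sorted_eq_foldl_insertBy]
    exact foldl_insertBy_congr _ _ xs []
      (fun x y hx hy => by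
        rcases hy with hy | hy
        · rw [h x hx, h y hy]
        · simp at hy)
  · rw [PySem.List.sorted_rev_eq_foldl_insertBy, PySem.List.sorted_rev_eq_foldl_insertBy]
    exact foldl_insertBy_congr _ _ xs []
      (fun x y hx hy => by
        rcases hy with hy | hy
        · rw [h x hx, h y hy]
        · simp at hy)

-- the head of the group starting at i is lst[i]
theorem head_slice_key (lst : List Int) (stride i : Int) (hs : 0 < stride)
    (h0 : 0 ≤ i) (hn : i < (lst.length : Int)) :
    PySem.List.pyGetD (PySem.List.slice lst (some i) (some (i + stride))) 0 0
      = PySem.List.pyGetD lst i 0 := by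
  rw [PySem.List.slice_toNat lst h0 (by omega), PySem.List.pyGetD_zero,
      PySem.List.pyGetD_eq_getElem lst 0 h0 hn]
  have htk : (i + stride).toNat - i.toNat ≠ 0 := by omega
  have hlen : i.toNat < lst.length := by omega
  rw [List.getD_eq_getElem?_getD, List.head?_eq_getElem?.symm, List.head?_take,
      if_neg htk, List.head?_drop, List.getElem?_eq_getElem hlen]
  rfl

-- ===== VERDICT (by name: the statement is the Claim_ definition above) =====
theorem api_llListSort_spec : Claim_equal_api_llListSort := by
  intro lst stride ascending _
  unfold Spec_api_llListSort api_llListSort api_llListSort_alt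
  by_cases hs : stride ≤ 0
  · simp [hs]
  · simp only [if_neg hs]
    have hpos : 0 < stride := by omega
    -- A's side: reduce to the slices of the stably sorted head indices
    rw [PySem.List.foldl_append_singleton_eq_map, List.nil_append]
    rw [sorted_map (fun i => PySem.List.slice lst (some i) (some (i + stride)))
        (fun g => PySem.List.pyGetD g 0 0) _ (!ascending)]
    rw [sorted_key_congr
        (fun i => PySem.List.pyGetD (PySem.List.slice lst (some i) (some (i + stride))) 0 0)
        (fun i => PySem.List.pyGetD lst i 0) _ (!ascending)
        (fun i hi => by
          rcases (PySem.List.mem_pyRange_iff_of_pos hpos i).mp hi with ⟨h0, hn, _⟩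
          exact head_slice_key lst stride i hpos h0 hn)]
    rw [List.foldl_map, PySem.List.foldl_append_eq_flatMap, List.nil_append]
    -- B's side: the selection loop computes the same flatMap
    rw [pv_selLoop_eq lst stride ascending _ _ rfl
        (pv_heads_pairwise (lst.length : Int) stride hpos) [], List.nil_append]
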